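-- pv_equiv track=rewrite | github.com/aasi-archive/bhagavad-gita | gita2html.py | ReplaceEnglishWithHindiNumbers
-- ===== SOURCE A (Python) =====
-- def ReplaceEnglishWithHindiNumbers(text):
--     nummap = {"1": "१",
--     "2": "२",
--     "3": "३",
--     "4": "४",
--     "5": "५",
--     "6": "६",
--     "7": "७",
--     "8": "८",
--     "9": "९",
--     "0": "०"
--     }
--
--     for num in nummap:
--         text = text.replace(num, nummap[num])
--     return text
-- ===== SOURCE B (Python) =====
-- DEVANAGARI_OFFSET = 0x966 - ord('0')  # 2358: distance from ASCII '0' to Devanagari '0'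
--
-- def ReplaceEnglishWithHindiNumbers(text):
--     out = []
--     for ch in text:
--         if '0' <= ch <= '9':
--             out.append(chr(ord(ch) + DEVANAGARI_OFFSET))
--         else:
--             out.append(ch)
--     return ''.join(out)
-- ===== Notes on version B (the rewrite author's own statement) =====
-- stated objective: alternative
-- what changed: B drops the digit dict entirely: a single pass over the characters converts each ASCII digit by adding the constant code-point offset 2358 (the Devanagari digit block is contiguous in Unicode), instead of A's ten successive full-string str.replace scans.
import Mathlib
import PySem

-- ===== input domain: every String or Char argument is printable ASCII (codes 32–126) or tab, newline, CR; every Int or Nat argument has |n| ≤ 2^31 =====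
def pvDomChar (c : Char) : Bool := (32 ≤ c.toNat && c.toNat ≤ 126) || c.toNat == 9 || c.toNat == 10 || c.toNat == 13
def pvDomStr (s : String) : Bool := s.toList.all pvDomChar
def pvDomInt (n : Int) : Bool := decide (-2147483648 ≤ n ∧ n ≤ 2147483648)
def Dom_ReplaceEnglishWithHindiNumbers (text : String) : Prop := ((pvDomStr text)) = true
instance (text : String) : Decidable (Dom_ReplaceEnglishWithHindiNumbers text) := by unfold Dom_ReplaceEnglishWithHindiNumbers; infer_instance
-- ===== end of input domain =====

-- B drops the digit dict: one pass converting each ASCII digit by the constant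
-- Unicode offset 0x966 - '0' (objective: alternative; same exact result).

-- ===== PORT A =====
-- the digit dict of A (dict literal, insertion order)
def pvNummapA : PySem.Dict String String :=
  PySem.Dict.ofList [("1","१"),("2","२"),("3","३"),("4","४"),("5","५"),
                     ("6","६"),("7","७"),("8","८"),("9","९"),("0","०")]

-- 'for num in nummap: text = text.replace(num, nummap[num])' — fold over the keys,
-- looking each key up (nummap[num] always hits, so getD's default is never used)
def ReplaceEnglishWithHindiNumbers (text : String) : String :=
  (PySem.Dict.keys pvNummapA).foldl
    (fun t num => PySem.Str.replace t num (PySem.Dict.getD pvNummapA num "")) text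

-- ===== PORT B =====
-- DEVANAGARI_OFFSET = 0x966 - ord('0') = 2358
def pvDevanagariOffset : Nat := 0x966 - '0'.toNat

-- the per-character loop of Source B: append chr(ord(ch)+offset) for ASCII digits, else ch
def pvConvChars : List Char → List Char
  | [] => []
  | ch :: rest =>
      (if '0' ≤ ch ∧ ch ≤ '9' then Char.ofNat (ch.toNat + pvDevanagariOffset) else ch)
        :: pvConvChars rest

def ReplaceEnglishWithHindiNumbers_alt (text : String) : String :=
  String.ofList (pvConvChars text.toList)

-- ===== PRECONDITION & SPEC =====
def Spec_ReplaceEnglishWithHindiNumbers (text : String) (out : String) : Prop := out = ReplaceEnglishWithHindiNumbers_alt text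
instance (text : String) (out : String) : Decidable (Spec_ReplaceEnglishWithHindiNumbers text out) := by unfold Spec_ReplaceEnglishWithHindiNumbers; infer_instance

-- ===== CLAIM (what is proved, stated in full; the proofs are below) =====
def Claim_equal_ReplaceEnglishWithHindiNumbers : Prop := ∀ (text : String), Dom_ReplaceEnglishWithHindiNumbers text → Spec_ReplaceEnglishWithHindiNumbers text (ReplaceEnglishWithHindiNumbers text)

-- ===== LEMMAS AND PROOFS =====

-- str.replace with a single-char needle: go over the characters
theorem pv_replace_go_single (a : Char) (new : List Char) :
    ∀ (l : List Char) (fuel : Nat) (acc : List Char), l.length ≤ fuel →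
    PySem.Chars.replace.go [a] new fuel l acc
      = acc.reverse ++ l.flatMap (fun c => if c = a then new else [c]) := by
  intro l
  induction l with
  | nil => intro fuel acc _; cases fuel <;> simp [PySem.Chars.replace.go]
  | cons c t ih =>
    intro fuel acc h
    cases fuel with
    | zero => simp at h
    | succ n =>
      by_cases hca : c = a
      · subst hca
        simp only [PySem.Chars.replace.go, List.isPrefixOf, BEq.rfl, Bool.true_and,
          if_true, List.length_singleton, List.drop_succ_cons, List.drop_zero]
        rw [ih _ _ (by simpa using h)]
        simp
      · have : [a].isPrefixOf (c :: t) = false := by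
          simp [List.isPrefixOf]; exact fun h' => absurd h'.symm hca
        simp only [PySem.Chars.replace.go, this, Bool.false_eq_true, if_false]
        rw [ih _ _ (by simpa using Nat.le_of_succ_le_succ h)]
        simp [hca]

theorem pv_replace_single (s : List Char) (a b : Char) :
    PySem.Chars.replace s [a] [b] = s.map (fun c => if c = a then b else c) := by
  simp only [PySem.Chars.replace, List.isEmpty_cons, Bool.false_eq_true, if_false]
  rw [pv_replace_go_single a [b] s s.length [] le_rfl]
  simp [List.flatMap]
  induction s with
  | nil => simp
  | cons c t ih => by_cases h : c = a <;> simp [h, ih]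

-- the one-character mapping both programs implement
def pvDigit (c : Char) : Char :=
  if c = '1' then '१' else if c = '2' then '२' else if c = '3' then '३' else
  if c = '4' then '४' else if c = '5' then '५' else if c = '6' then '६' else
  if c = '7' then '७' else if c = '8' then '८' else if c = '9' then '९' else
  if c = '0' then '०' else c

theorem pv_A_eq (text : String) :
    ReplaceEnglishWithHindiNumbers text = String.ofList (text.toList.map pvDigit) := by
  unfold ReplaceEnglishWithHindiNumbers
  rw [show PySem.Dict.keys pvNummapA = ["1","2","3","4","5","6","7","8","9","0"] from (by decide)]
  simp only [List.foldl_cons, List.foldl_nil]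
  rw [show PySem.Dict.getD pvNummapA "1" "" = "१" from (by decide), show PySem.Dict.getD pvNummapA "2" "" = "२" from (by decide), show PySem.Dict.getD pvNummapA "3" "" = "३" from (by decide), show PySem.Dict.getD pvNummapA "4" "" = "४" from (by decide), show PySem.Dict.getD pvNummapA "5" "" = "५" from (by decide), show PySem.Dict.getD pvNummapA "6" "" = "६" from (by decide), show PySem.Dict.getD pvNummapA "7" "" = "७" from (by decide), show PySem.Dict.getD pvNummapA "8" "" = "८" from (by decide), show PySem.Dict.getD pvNummapA "9" "" = "९" from (by decide), show PySem.Dict.getD pvNummapA "0" "" = "०" from (by decide)]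
  simp only [PySem.Str.replace]
  simp only [String.toList_ofList, show ("1":String).toList = ['1'] by decide, show ("2":String).toList = ['2'] by decide, show ("3":String).toList = ['3'] by decide, show ("4":String).toList = ['4'] by decide, show ("5":String).toList = ['5'] by decide, show ("6":String).toList = ['6'] by decide, show ("7":String).toList = ['7'] by decide, show ("8":String).toList = ['8'] by decide, show ("9":String).toList = ['9'] by decide, show ("0":String).toList = ['0'] by decide, show ("१":String).toList = ['१'] by decide, show ("२":String).toList = ['२'] by decide, show ("३":String).toList = ['३'] by decide, show ("४":String).toList = ['४'] by decide, show ("५":String).toList = ['५'] by decide, show ("६":String).toList = ['६'] by decide, show ("७":String).toList = ['७'] by decide, show ("८":String).toList = ['८'] by decide, show ("९":String).toList = ['९'] by decide, show ("०":String).toList = ['०'] by decide, pv_replace_single, List.map_map]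
  refine congrArg String.ofList (List.map_congr_left ?_)
  intro c _
  by_cases h1 : c = '1'
  · subst h1; rfl
  by_cases h2 : c = '2'
  · subst h2; rfl
  by_cases h3 : c = '3'
  · subst h3; rfl
  by_cases h4 : c = '4'
  · subst h4; rfl
  by_cases h5 : c = '5'
  · subst h5; rfl
  by_cases h6 : c = '6'
  · subst h6; rfl
  by_cases h7 : c = '7'
  · subst h7; rfl
  by_cases h8 : c = '8'
  · subst h8; rfl
  by_cases h9 : c = '9'
  · subst h9; rfl
  by_cases h0 : c = '0'
  · subst h0; rfl
  rw [Function.comp_apply, Function.comp_apply, Function.comp_apply, Function.comp_apply, Function.comp_apply, Function.comp_apply, Function.comp_apply, Function.comp_apply, Function.comp_apply]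
  rw [if_neg h1]
  rw [if_neg h2]
  rw [if_neg h3]
  rw [if_neg h4]
  rw [if_neg h5]
  rw [if_neg h6]
  rw [if_neg h7]
  rw [if_neg h8]
  rw [if_neg h9]
  rw [if_neg h0]
  unfold pvDigit
  rw [if_neg h1, if_neg h2, if_neg h3, if_neg h4, if_neg h5, if_neg h6, if_neg h7, if_neg h8, if_neg h9, if_neg h0]

-- B's per-character offset conversion agrees with pvDigit
theorem pv_offset_eq (c : Char) :
    (if '0' ≤ c ∧ c ≤ '9' then Char.ofNat (c.toNat + pvDevanagariOffset) else c)
      = pvDigit c := by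
  by_cases h1 : c = '1'
  · subst h1; decide
  by_cases h2 : c = '2'
  · subst h2; decide
  by_cases h3 : c = '3'
  · subst h3; decide
  by_cases h4 : c = '4'
  · subst h4; decide
  by_cases h5 : c = '5'
  · subst h5; decide
  by_cases h6 : c = '6'
  · subst h6; decide
  by_cases h7 : c = '7'
  · subst h7; decide
  by_cases h8 : c = '8'
  · subst h8; decide
  by_cases h9 : c = '9'
  · subst h9; decide
  by_cases h0 : c = '0'
  · subst h0; decide
  have hnd : ¬ ('0' ≤ c ∧ c ≤ '9') := by
    rintro ⟨hlo, hhi⟩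
    have hlo' : ('0' : Char).toNat ≤ c.toNat := hlo
    have hhi' : c.toNat ≤ ('9' : Char).toNat := hhi
    have h48 : ('0' : Char).toNat = 48 := by decide
    have h57 : ('9' : Char).toNat = 57 := by decide
    have hv : 48 ≤ c.toNat ∧ c.toNat ≤ 57 := ⟨h48 ▸ hlo', h57 ▸ hhi'⟩
    have hd : c.toNat = 48 ∨ c.toNat = 49 ∨ c.toNat = 50 ∨ c.toNat = 51 ∨ c.toNat = 52 ∨
        c.toNat = 53 ∨ c.toNat = 54 ∨ c.toNat = 55 ∨ c.toNat = 56 ∨ c.toNat = 57 := by omega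
    have hof : ∀ n : Nat, c.toNat = n → c = Char.ofNat n := by
      intro n hn
      have := Char.ofNat_toNat c
      rw [hn] at this; exact this.symm
    rcases hd with h|h|h|h|h|h|h|h|h|h
    · exact h0 (hof 48 h)
    · exact h1 (hof 49 h)
    · exact h2 (hof 50 h)
    · exact h3 (hof 51 h)
    · exact h4 (hof 52 h)
    · exact h5 (hof 53 h)
    · exact h6 (hof 54 h)
    · exact h7 (hof 55 h)
    · exact h8 (hof 56 h)
    · exact h9 (hof 57 h)
  rw [if_neg hnd]
  unfold pvDigit
  rw [if_neg h1, if_neg h2, if_neg h3, if_neg h4, if_neg h5, if_neg h6, if_neg h7, if_neg h8, if_neg h9, if_neg h0]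

theorem pv_B_eq (text : String) :
    ReplaceEnglishWithHindiNumbers_alt text = String.ofList (text.toList.map pvDigit) := by
  unfold ReplaceEnglishWithHindiNumbers_alt
  refine congrArg String.ofList ?_
  induction text.toList with
  | nil => rfl
  | cons c t ih => simp only [pvConvChars, List.map_cons, ih, pv_offset_eq]

-- ===== VERDICT (by name: the statement is the Claim_ definition above) =====
theorem ReplaceEnglishWithHindiNumbers_spec : Claim_equal_ReplaceEnglishWithHindiNumbers := by
  intro text _
  unfold Spec_ReplaceEnglishWithHindiNumbers
  rw [pv_A_eq, pv_B_eq]
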